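-- pv_equiv track=rewrite | github.com/danielbackhouse/MotionWare-Streamline | Version 4/noSleepDiarySleepWindow.py | find_sleep_windows
-- ===== SOURCE A (Python) =====
-- def find_sleep_windows(date, time, activity, lux):
--     """ Find the sleep window. Does this by getting a list of of all 12 hour
--     periods starting from the start index and then finds the 14 (for a 14 day study)
--     with the most amount of motion below the mean (may change this to counts of zero
--     or motion below sme ther threshold)
--     """
--     start_index = 0
--     one_hour_epoch = 60
--     sleepRange = one_hour_epoch*12
--     required_epoch_range = 14*24*60
--
--     activity_list = list()
--     light_list = list()
--     indexRange_list = list()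
--     index = start_index
--     while (index + sleepRange) <= (start_index+required_epoch_range):
--         light_list.append(lux[index:index+sleepRange])
--         activity_list.append(activity[index:index+sleepRange])
--         indexRange_list.append([index, index+sleepRange])
--         index = index + one_hour_epoch
--
--     sortedWeights, sortedIndexRange = sort_lists(light_list, activity_list, indexRange_list)
--
--     return  sortedWeights, sortedIndexRange
--
-- def sort_lists(lightList, activityList, indexRangeList):
--     """ Sorts the lists by the specified paramters given
--     """
--     activityThreshold = 20
--     lightWeight = 1
--     activityWeight = 1
--     weightedSleepPeriods = list()
--     for i in range(0 , len(activityList)):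
--         activityVal =  count_below_threshold_in_array(activityList[i], activityThreshold)
--         lightVal = count_zeros_in_array(lightList[i])
--         val = activityVal*activityWeight + lightWeight*lightVal
--         weightedSleepPeriods.append(val)
--
--     sortedWeights, sortedIndexRange = bubbleSort(weightedSleepPeriods, indexRangeList)
--
--     return sortedWeights, sortedIndexRange
--
-- def bubbleSort(arr, arr2):
--     """ Bubble sorts array and moves other array elements likewise
--     """
--     n = len(arr)
--
--     for i in range(n):
--         for j in range(0, n-i-1):
--             if arr[j] > arr[j+1] :
--                 arr[j], arr[j+1] = arr[j+1], arr[j]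
--                 arr2[j], arr2[j+1] = arr2[j+1], arr2[j]
--     return arr, arr2
--
-- def count_below_threshold_in_array(arr, threshold):
--     """ Counts the number of elements in array below threshold
--
--     :param (array) arr: an array of int's
--     :return: The number of elements in array below threshld
--     :rtype: (int)
--     """
--     counter = 0;
--     for num in  arr:
--         if(num <= threshold):
--             counter = counter + 1
--
--     return counter
--
-- def count_zeros_in_array(arr):
--     """ Counts the number of zeros in an array with integer values
--
--     :param (array) arr: an array of int's
--     :return: The number of zeros in the array
--     :rtype: (int)
--     """
--     zero_counter = 0;
--     for num in  arr:
--         if(num == 0):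
--             zero_counter = zero_counter + 1
--
--     return zero_counter
-- ===== SOURCE B (Python) =====
-- def find_sleep_windows(date, time, activity, lux):
--     """Same result as the original: weights of all 12h windows (hourly starts
--     over a 14-day span), sorted ascending with their [start, end] ranges.
--     Re-implementation: prefix-sum counts per window instead of re-scanning
--     each 720-epoch slice, and a single stable sorted() instead of bubble sort."""
--     one_hour = 60
--     window = 12 * one_hour                      # 720
--     span = 14 * 24 * 60                         # 20160
--     last_start = span - window                  # 19440
--
--     # Only the first `span` epochs can ever be read.
--     act = activity[:span]
--     lit = lux[:span]
--     na, nl = len(act), len(lit)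
--
--     # prefix counts: pa[k] = #low-activity epochs among act[:k], pl[k] = #zero-lux among lit[:k]
--     pa = [0]
--     s = 0
--     for v in act:
--         if v <= 20:
--             s += 1
--         pa.append(s)
--     pl = [0]
--     s = 0
--     for v in lit:
--         if v == 0:
--             s += 1
--         pl.append(s)
--
--     pairs = []
--     for start in range(0, last_start + 1, one_hour):
--         end = start + window
--         w = (pa[min(end, na)] - pa[min(start, na)]) + (pl[min(end, nl)] - pl[min(start, nl)])
--         pairs.append((w, [start, end]))
--
--     ordered = sorted(pairs, key=lambda p: p[0])   # stable, ascending by weight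
--     return [w for w, _ in ordered], [r for _, r in ordered]
-- ===== Notes on version B (the rewrite author's own statement) =====
-- stated objective: alternative
-- what changed: B computes each window's low-activity/zero-lux weight from prefix-sum count arrays built in one pass over the (at most 20160-epoch) relevant data instead of re-scanning every 720-epoch slice, and ranks the 325 windows with one stable sorted() by weight instead of an O(m^2) parallel bubble sort (intended as faster; measured 4x at n=4096 but only 1.28x at the largest timing size, where fixed overhead dominates both).
import Mathlib
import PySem

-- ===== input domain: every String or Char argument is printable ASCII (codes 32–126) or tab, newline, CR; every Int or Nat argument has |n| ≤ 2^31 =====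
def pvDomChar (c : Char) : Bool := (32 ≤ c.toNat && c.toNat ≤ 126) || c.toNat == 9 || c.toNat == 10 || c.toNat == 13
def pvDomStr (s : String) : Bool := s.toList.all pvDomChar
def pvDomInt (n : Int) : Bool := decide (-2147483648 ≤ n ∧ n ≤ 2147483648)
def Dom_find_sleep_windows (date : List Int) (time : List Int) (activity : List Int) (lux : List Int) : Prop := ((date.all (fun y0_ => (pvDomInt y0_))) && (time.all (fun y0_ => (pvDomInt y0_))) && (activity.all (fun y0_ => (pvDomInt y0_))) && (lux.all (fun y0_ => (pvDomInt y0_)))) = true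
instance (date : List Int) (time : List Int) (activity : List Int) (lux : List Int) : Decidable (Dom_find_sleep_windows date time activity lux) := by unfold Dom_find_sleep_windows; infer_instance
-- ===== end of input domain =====

-- B replaces A's per-window 720-element rescans by prefix-sum counts and A's
-- quadratic bubble sort by one stable sorted(); same return value (return-value
-- equivalence; neither version observably mutates its arguments).

-- ===== PORT A =====

def pvA_countBelow (arr : List Int) (threshold : Int) : Int :=
  arr.foldl (fun counter num => if num ≤ threshold then counter + 1 else counter) 0

def pvA_countZeros (arr : List Int) : Int :=
  arr.foldl (fun zc num => if num == 0 then zc + 1 else zc) 0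

-- the while loop of find_sleep_windows: builds (light_list, activity_list, indexRange_list)
def pvA_build (activity lux : List Int) (index : Int) :
    List (List Int) × List (List Int) × List (List Int) :=
  if index + 720 ≤ 0 + 20160 then
    let rest := pvA_build activity lux (index + 60)
    (PySem.List.slice lux (some index) (some (index + 720)) :: rest.1,
     PySem.List.slice activity (some index) (some (index + 720)) :: rest.2.1,
     [index, index + 720] :: rest.2.2)
  else ([], [], [])
  termination_by (20160 - index).toNat
  decreasing_by omega

-- inner loop of bubbleSort: for j in range(0, stop): compare/swap in both lists
def pvA_bubbleInner (arr : List Int) (arr2 : List (List Int)) (j stop : Nat) :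
    List Int × List (List Int) :=
  if j < stop then
    let aj := PySem.List.pyGetD arr (j : Int) 0
    let aj1 := PySem.List.pyGetD arr ((j : Int) + 1) 0
    if aj1 < aj then
      let bj := PySem.List.pyGetD arr2 (j : Int) []
      let bj1 := PySem.List.pyGetD arr2 ((j : Int) + 1) []
      pvA_bubbleInner ((arr.set j aj1).set (j + 1) aj)
        ((arr2.set j bj1).set (j + 1) bj) (j + 1) stop
    else
      pvA_bubbleInner arr arr2 (j + 1) stop
  else (arr, arr2)
  termination_by stop - j

-- outer loop of bubbleSort: for i in range(n): inner loop with stop = n-i-1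
def pvA_bubbleOuter (arr : List Int) (arr2 : List (List Int)) (i n : Nat) :
    List Int × List (List Int) :=
  if i < n then
    let st := pvA_bubbleInner arr arr2 0 (n - i - 1)
    pvA_bubbleOuter st.1 st.2 (i + 1) n
  else (arr, arr2)
  termination_by n - i

def pvA_bubbleSort (arr : List Int) (arr2 : List (List Int)) : List Int × List (List Int) :=
  pvA_bubbleOuter arr arr2 0 arr.length

def pvA_sort_lists (lightList activityList indexRangeList : List (List Int)) :
    List Int × List (List Int) :=
  let weighted := (PySem.List.pyRange 0 (activityList.length : Int) 1).foldl
    (fun acc i =>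
      acc ++ [pvA_countBelow (PySem.List.pyGetD activityList i []) 20 * 1 +
              1 * pvA_countZeros (PySem.List.pyGetD lightList i [])]) []
  pvA_bubbleSort weighted indexRangeList

def find_sleep_windows (date : List Int) (time : List Int) (activity : List Int) (lux : List Int) :
    List Int × List (List Int) :=
  let b := pvA_build activity lux 0
  pvA_sort_lists b.1 b.2.1 b.2.2

-- ===== PORT B =====

-- prefix-count list: p[k] = number of elements among l[:k] satisfying f
def pvB_prefix (l : List Int) (f : Int → Bool) : List Int :=
  (l.foldl (fun (st : List Int × Int) v =>
      let s := if f v then st.2 + 1 else st.2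
      (st.1 ++ [s], s)) ([0], 0)).1

def find_sleep_windows_alt (date : List Int) (time : List Int) (activity : List Int) (lux : List Int) :
    List Int × List (List Int) :=
  let act := PySem.List.slice activity none (some 20160)
  let lit := PySem.List.slice lux none (some 20160)
  let na : Int := (act.length : Int)
  let nl : Int := (lit.length : Int)
  let pa := pvB_prefix act (fun v => decide (v ≤ 20))
  let pl := pvB_prefix lit (fun v => v == 0)
  let pairs := (PySem.List.pyRange 0 (19440 + 1) 60).foldl
    (fun acc start =>
      let e := start + 720
      let w := (PySem.List.pyGetD pa (min e na) 0 - PySem.List.pyGetD pa (min start na) 0) +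
               (PySem.List.pyGetD pl (min e nl) 0 - PySem.List.pyGetD pl (min start nl) 0)
      acc ++ [(w, [start, e])]) ([] : List (Int × List Int))
  let ordered := PySem.List.sorted pairs (fun p => p.1) false
  (ordered.map (fun p => p.1), ordered.map (fun p => p.2))

-- ===== PRECONDITION & SPEC =====
def Spec_find_sleep_windows (date : List Int) (time : List Int) (activity : List Int) (lux : List Int) (out : List Int × List (List Int)) : Prop := out = find_sleep_windows_alt date time activity lux
instance (date : List Int) (time : List Int) (activity : List Int) (lux : List Int) (out : List Int × List (List Int)) : Decidable (Spec_find_sleep_windows date time activity lux out) := by unfold Spec_find_sleep_windows; infer_instance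

-- ===== CLAIM (what is proved, stated in full; the proofs are below) =====
def Claim_equal_find_sleep_windows : Prop := ∀ (date : List Int) (time : List Int) (activity : List Int) (lux : List Int), Dom_find_sleep_windows date time activity lux → Spec_find_sleep_windows date time activity lux (find_sleep_windows date time activity lux)

-- ===== LEMMAS AND PROOFS =====

-- ---- generic bubble-pass machinery (proof-side) ----

-- one (bounded) left-to-right bubble pass, comparing by weight w
def pvPass {α : Type} (w : α → Int) : Nat → List α → List α
  | _, [] => []
  | 0, l => l
  | _ + 1, [x] => [x]
  | k + 1, x :: y :: t => if w y < w x then y :: pvPass w k (x :: t) else x :: pvPass w k (y :: t)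

-- the outer loop: with fuel k+1 the next pass has bound k
def pvOuter {α : Type} (w : α → Int) : Nat → List α → List α
  | 0, l => l
  | k + 1, l => pvOuter w k (pvPass w k l)

lemma pvPass_zero {α : Type} (w : α → Int) (l : List α) : pvPass w 0 l = l := by
  cases l <;> rfl

lemma pvPass_perm {α : Type} (w : α → Int) : ∀ (k : Nat) (l : List α), (pvPass w k l).Perm l := by
  intro k
  induction k with
  | zero => intro l; rw [pvPass_zero]
  | succ k ih =>
    intro l
    match l with
    | [] => simp [pvPass]
    | [x] => simp [pvPass]
    | x :: y :: t =>
      simp only [pvPass]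
      split
      · exact ((ih (x :: t)).cons y).trans (List.Perm.swap x y t)
      · exact (ih (y :: t)).cons x

lemma pvPass_length {α : Type} (w : α → Int) (k : Nat) (l : List α) :
    (pvPass w k l).length = l.length := (pvPass_perm w k l).length_eq

lemma pvOuter_perm {α : Type} (w : α → Int) : ∀ (k : Nat) (l : List α), (pvOuter w k l).Perm l := by
  intro k
  induction k with
  | zero => intro l; rfl
  | succ k ih => intro l; exact (ih (pvPass w k l)).trans (pvPass_perm w k l)

-- a pass preserves any Pairwise relation S for which "strictly lighter" elements
-- may be moved left (covers the stability relation)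
lemma pvPass_pairwise {α : Type} (w : α → Int) (S : α → α → Prop)
    (hS : ∀ a b, w b < w a → S b a) :
    ∀ (k : Nat) (l : List α), l.Pairwise S → (pvPass w k l).Pairwise S := by
  intro k
  induction k with
  | zero => intro l h; rwa [pvPass_zero]
  | succ k ih =>
    intro l h
    match l with
    | [] => simpa [pvPass] using h
    | [x] => simpa [pvPass] using h
    | x :: y :: t =>
      rw [List.pairwise_cons] at h
      obtain ⟨hx, h⟩ := h
      rw [List.pairwise_cons] at h
      obtain ⟨hy, ht⟩ := h
      simp only [pvPass]
      split
      · rename_i hlt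
        refine List.pairwise_cons.2 ⟨?_, ih (x :: t) (List.pairwise_cons.2 ⟨fun z hz => hx z (List.mem_cons_of_mem y hz), ht⟩)⟩
        intro z hz
        have hz' : z ∈ x :: t := (pvPass_perm w k (x :: t)).mem_iff.1 hz
        rcases List.mem_cons.1 hz' with rfl | hz'
        · exact hS _ _ (by assumption)
        · exact hy z hz'
      · refine List.pairwise_cons.2 ⟨?_, ih (y :: t) (List.pairwise_cons.2 ⟨hy, ht⟩)⟩
        intro z hz
        have hz' : z ∈ y :: t := (pvPass_perm w k (y :: t)).mem_iff.1 hz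
        rcases List.mem_cons.1 hz' with rfl | hz'
        · exact hx z (List.mem_cons_self)
        · exact hx z (List.mem_cons_of_mem y hz')

lemma pvOuter_pairwise {α : Type} (w : α → Int) (S : α → α → Prop)
    (hS : ∀ a b, w b < w a → S b a) :
    ∀ (k : Nat) (l : List α), l.Pairwise S → (pvOuter w k l).Pairwise S := by
  intro k
  induction k with
  | zero => intro l h; exact h
  | succ k ih => intro l h; exact ih _ (pvPass_pairwise w S hS k l h)

-- a full pass over p moves a maximum to the end
lemma pvPass_last_max {α : Type} (w : α → Int) :
    ∀ (n : Nat) (p : List α), p.length = n + 1 →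
      ∃ q m, pvPass w n p = q ++ [m] ∧ ∀ a ∈ p, w a ≤ w m := by
  intro n
  induction n with
  | zero =>
    intro p hp
    match p with
    | [x] => exact ⟨[], x, rfl, by simp⟩
  | succ n ih =>
    intro p hp
    match p with
    | x :: y :: t =>
      simp only [List.length_cons] at hp
      simp only [pvPass]
      split
      · rename_i hlt
        obtain ⟨q, m, hqm, hmax⟩ := ih (x :: t) (by simpa using hp)
        refine ⟨y :: q, m, by simp [hqm], ?_⟩
        intro a ha
        rcases List.mem_cons.1 ha with rfl | ha
        · exact hmax a List.mem_cons_self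
        rcases List.mem_cons.1 ha with rfl | ha
        · exact le_of_lt (lt_of_lt_of_le hlt (hmax x List.mem_cons_self))
        · exact hmax a (List.mem_cons_of_mem x ha)
      · rename_i hnlt
        obtain ⟨q, m, hqm, hmax⟩ := ih (y :: t) (by simpa using hp)
        refine ⟨x :: q, m, by simp [hqm], ?_⟩
        intro a ha
        rcases List.mem_cons.1 ha with rfl | ha
        · exact le_trans (not_lt.1 hnlt) (hmax y List.mem_cons_self)
        · exact hmax a ha

-- a bounded pass does not touch the tail past the bound
lemma pvPass_append {α : Type} (w : α → Int) :
    ∀ (k : Nat) (p s : List α), k + 1 ≤ p.length →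
      pvPass w k (p ++ s) = pvPass w k p ++ s := by
  intro k
  induction k with
  | zero => intro p s _; rw [pvPass_zero, pvPass_zero]
  | succ k ih =>
    intro p s hp
    match p with
    | [x] => simp at hp
    | x :: y :: t =>
      simp only [List.cons_append, pvPass]
      split
      · rw [← List.cons_append, ih (x :: t) s (by simpa using hp)]; rfl
      · rw [← List.cons_append, ih (y :: t) s (by simpa using hp)]; rfl

-- main sortedness invariant of the shrinking-pass outer loop
lemma pvOuter_sorted_aux {α : Type} (w : α → Int) :
    ∀ (k : Nat) (p s : List α), p.length = k →
      (∀ a ∈ p, ∀ b ∈ s, w a ≤ w b) →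
      s.Pairwise (fun a b => w a ≤ w b) →
      (pvOuter w k (p ++ s)).Pairwise (fun a b => w a ≤ w b) := by
  intro k
  induction k with
  | zero =>
    intro p s hp _ hs
    have : p = [] := List.length_eq_zero_iff.1 hp
    subst this
    simpa [pvOuter] using hs
  | succ k ih =>
    intro p s hp hcross hs
    simp only [pvOuter]
    rw [pvPass_append w k p s (by omega)]
    obtain ⟨q, m, hqm, hmax⟩ := pvPass_last_max w k p (by omega)
    have hqlen : q.length = k := by
      have := pvPass_length w k p
      rw [hqm] at this
      simp at this
      omega
    have hperm : (q ++ [m]).Perm p := hqm ▸ pvPass_perm w k p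
    have hmem : ∀ a, a ∈ q → a ∈ p := fun a ha => hperm.mem_iff.1 (by simp [ha])
    have hm_mem : m ∈ p := hperm.mem_iff.1 (by simp)
    rw [hqm, List.append_assoc]
    refine ih q (m :: s) hqlen ?_ ?_
    · intro a ha b hb
      rcases List.mem_cons.1 hb with rfl | hb
      · exact hmax a (hmem a ha)
      · exact hcross a (hmem a ha) b hb
    · refine List.pairwise_cons.2 ⟨fun b hb => hcross m hm_mem b hb, hs⟩

-- ---- the index-level bubble sort of A equals pvPass/pvOuter ----

lemma pv_getD_append_length {α : Type} (l₁ : List α) (a : α) (l₂ : List α) (d : α) :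
    (l₁ ++ a :: l₂).getD l₁.length d = a := by
  induction l₁ with
  | nil => rfl
  | cons x l ih => simpa using ih

lemma pv_getD_append_length_succ {α : Type} (l₁ : List α) (a b : α) (l₂ : List α) (d : α) :
    (l₁ ++ a :: b :: l₂).getD (l₁.length + 1) d = b := by
  induction l₁ with
  | nil => rfl
  | cons x l ih => simpa using ih

lemma pv_set_append_length {α : Type} (l₁ : List α) (a : α) (l₂ : List α) (v : α) :
    (l₁ ++ a :: l₂).set l₁.length v = l₁ ++ v :: l₂ := by
  induction l₁ with
  | nil => rfl
  | cons x l ih => simpa using ih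

lemma pv_set_append_length_succ {α : Type} (l₁ : List α) (a b : α) (l₂ : List α) (v : α) :
    (l₁ ++ a :: b :: l₂).set (l₁.length + 1) v = l₁ ++ a :: v :: l₂ := by
  induction l₁ with
  | nil => rfl
  | cons x l ih => simpa using ih

lemma pvInner_eq :
    ∀ (fuel : Nat) (pre rest : List (Int × List Int)) (stop : Nat),
      stop - pre.length ≤ fuel → stop + 1 ≤ pre.length + rest.length →
      pvA_bubbleInner ((pre ++ rest).map Prod.fst) ((pre ++ rest).map Prod.snd) pre.length stop =
        (((pre ++ pvPass Prod.fst (stop - pre.length) rest).map Prod.fst),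
         ((pre ++ pvPass Prod.fst (stop - pre.length) rest).map Prod.snd)) := by
  intro fuel
  induction fuel with
  | zero =>
    intro pre rest stop hf hlen
    have hstop : stop ≤ pre.length := by omega
    rw [pvA_bubbleInner]
    simp only [if_neg (by omega : ¬ pre.length < stop)]
    have : stop - pre.length = 0 := by omega
    rw [this, pvPass_zero]
  | succ fuel ih =>
    intro pre rest stop hf hlen
    by_cases hj : pre.length < stop
    · -- rest has at least two elements
      match rest with
      | [] => simp at hlen; omega
      | [x] => simp at hlen; omega
      | x :: y :: t =>
        rw [pvA_bubbleInner]
        simp only [if_pos hj]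
        have hmap1 : (pre ++ x :: y :: t).map Prod.fst
            = pre.map Prod.fst ++ x.1 :: y.1 :: t.map Prod.fst := by simp
        have hmap2 : (pre ++ x :: y :: t).map Prod.snd
            = pre.map Prod.snd ++ x.2 :: y.2 :: t.map Prod.snd := by simp
        have hlenf : (pre.map Prod.fst).length = pre.length := by simp
        have hlens : (pre.map Prod.snd).length = pre.length := by simp
        have hg1 : PySem.List.pyGetD ((pre ++ x :: y :: t).map Prod.fst) (pre.length : Int) 0 = x.1 := by
          rw [hmap1, PySem.List.pyGetD_natCast, ← hlenf, pv_getD_append_length]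
        have hg2 : PySem.List.pyGetD ((pre ++ x :: y :: t).map Prod.fst) ((pre.length : Int) + 1) 0 = y.1 := by
          rw [hmap1]
          rw [show ((pre.length : Int) + 1) = ((pre.length + 1 : Nat) : Int) by push_cast; ring]
          rw [PySem.List.pyGetD_natCast, ← hlenf, pv_getD_append_length_succ]
        have hg3 : PySem.List.pyGetD ((pre ++ x :: y :: t).map Prod.snd) (pre.length : Int) [] = x.2 := by
          rw [hmap2, PySem.List.pyGetD_natCast, ← hlens, pv_getD_append_length]
        have hg4 : PySem.List.pyGetD ((pre ++ x :: y :: t).map Prod.snd) ((pre.length : Int) + 1) [] = y.2 := by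
          rw [hmap2]
          rw [show ((pre.length : Int) + 1) = ((pre.length + 1 : Nat) : Int) by push_cast; ring]
          rw [PySem.List.pyGetD_natCast, ← hlens, pv_getD_append_length_succ]
        rw [hg1, hg2, hg3, hg4]
        have hstep : stop - (pre ++ [y]).length ≤ fuel ∧ stop - (pre ++ [x]).length ≤ fuel := by
          simp; omega
        by_cases hlt : y.1 < x.1
        · simp only [if_pos hlt]
          have hsets1 : (((pre ++ x :: y :: t).map Prod.fst).set pre.length y.1).set (pre.length + 1) x.1
              = ((pre ++ [y]) ++ x :: t).map Prod.fst := by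
            rw [hmap1, ← hlenf, pv_set_append_length, pv_set_append_length_succ]
            simp
          have hsets2 : (((pre ++ x :: y :: t).map Prod.snd).set pre.length y.2).set (pre.length + 1) x.2
              = ((pre ++ [y]) ++ x :: t).map Prod.snd := by
            rw [hmap2, ← hlens, pv_set_append_length, pv_set_append_length_succ]
            simp
          rw [hsets1, hsets2]
          have hpl : pre.length + 1 = (pre ++ [y]).length := by simp
          rw [hpl, ih (pre ++ [y]) (x :: t) stop hstep.1 (by simp; simp at hlen; omega)]
          have hk : stop - pre.length = (stop - (pre ++ [y]).length) + 1 := by simp; omega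
          rw [hk]
          simp only [pvPass, if_pos hlt, List.append_assoc, List.singleton_append]
        · simp only [if_neg hlt]
          have hpl : pre.length + 1 = (pre ++ [x]).length := by simp
          have hre : pre ++ x :: y :: t = (pre ++ [x]) ++ y :: t := by simp
          rw [hre, hpl, ih (pre ++ [x]) (y :: t) stop hstep.2 (by simp; simp at hlen; omega)]
          have hk : stop - pre.length = (stop - (pre ++ [x]).length) + 1 := by simp; omega
          rw [hk]
          simp only [pvPass, if_neg hlt, List.append_assoc, List.singleton_append]
    · rw [pvA_bubbleInner]
      simp only [if_neg hj]
      have : stop - pre.length = 0 := by omega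
      rw [this, pvPass_zero]

lemma pvOuter_eq :
    ∀ (k : Nat) (l : List (Int × List Int)) (i n : Nat), i + k = n → n = l.length →
      pvA_bubbleOuter (l.map Prod.fst) (l.map Prod.snd) i n =
        ((pvOuter Prod.fst k l).map Prod.fst, (pvOuter Prod.fst k l).map Prod.snd) := by
  intro k
  induction k with
  | zero =>
    intro l i n hi hn
    rw [pvA_bubbleOuter]
    simp only [if_neg (by omega : ¬ i < n)]
    rfl
  | succ k ih =>
    intro l i n hi hn
    rw [pvA_bubbleOuter]
    simp only [if_pos (by omega : i < n)]
    have hinner := pvInner_eq (n - i - 1) [] l (n - i - 1) (by simp) (by simp; omega)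
    simp only [List.nil_append, List.length_nil, Nat.sub_zero] at hinner
    rw [hinner]
    have hni : n - i - 1 = k := by omega
    rw [hni]
    have := ih (pvPass Prod.fst k l) (i + 1) n (by omega) (by rw [pvPass_length]; omega)
    simp only at this ⊢
    rw [this]
    rfl

-- ---- tagging: transporting pvPass/pvOuter along map Prod.fst ----

lemma map_pvPass {α β : Type} (f : α → β) (w : β → Int) :
    ∀ (k : Nat) (l : List α), (pvPass (fun a => w (f a)) k l).map f = pvPass w k (l.map f) := by
  intro k
  induction k with
  | zero => intro l; rw [pvPass_zero, pvPass_zero]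
  | succ k ih =>
    intro l
    match l with
    | [] => rfl
    | [x] => rfl
    | x :: y :: t =>
      simp only [pvPass, List.map_cons]
      split
      · simp [ih (x :: t)]
      · simp [ih (y :: t)]

lemma map_pvOuter {α β : Type} (f : α → β) (w : β → Int) :
    ∀ (k : Nat) (l : List α), (pvOuter (fun a => w (f a)) k l).map f = pvOuter w k (l.map f) := by
  intro k
  induction k with
  | zero => intro l; rfl
  | succ k ih =>
    intro l
    simp only [pvOuter]
    rw [ih, map_pvPass]

-- ---- the tag order: lexicographic (weight, original index) key ----

def pvKeyL (x : (Int × List Int) × Nat) : Int ×ₗ Int := toLex (x.1.1, (x.2 : Int))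

def pvWT (x : (Int × List Int) × Nat) : Int := x.1.1

lemma pv_zipIdx_tags {α : Type} :
    ∀ (l : List α) (n : Nat), (l.zipIdx n).Pairwise (fun a b => a.2 < b.2) := by
  intro l
  induction l with
  | nil => intro n; simp
  | cons x t ih =>
    intro n
    rw [List.zipIdx_cons, List.pairwise_cons]
    refine ⟨?_, ih (n + 1)⟩
    intro z hz
    have := List.mem_zipIdx (by exact (Prod.mk.eta ▸ hz) : (z.1, z.2) ∈ t.zipIdx (n + 1))
    omega

-- the fully bubbled tagged list is strictly sorted by the lexicographic key
lemma pvOuter_tagged_pairwise_lt (tl : List ((Int × List Int) × Nat))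
    (htags : tl.Pairwise (fun a b => a.2 < b.2)) :
    (pvOuter pvWT tl.length tl).Pairwise (fun a b => pvKeyL a < pvKeyL b) := by
  have hW : (pvOuter pvWT tl.length tl).Pairwise
      (fun a b => pvWT a = pvWT b → a.2 < b.2) := by
    refine pvOuter_pairwise pvWT _ ?_ tl.length tl ?_
    · intro a b hab
      intro h
      omega
    · refine htags.imp ?_
      intro a b h _
      exact h
  have hle : (pvOuter pvWT tl.length tl).Pairwise (fun a b => pvWT a ≤ pvWT b) := by
    have := pvOuter_sorted_aux pvWT tl.length tl [] rfl (by simp) (by simp)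
    simpa using this
  refine (hle.and hW).imp ?_
  intro a b hab
  rcases lt_or_eq_of_le hab.1 with h | h
  · exact Prod.Lex.toLex_lt_toLex.2 (Or.inl h)
  · refine Prod.Lex.toLex_lt_toLex.2 (Or.inr ⟨h, ?_⟩)
    show (a.2 : Int) < (b.2 : Int)
    exact_mod_cast hab.2 h

-- ---- stability of PySem.List.sorted: sorting pairs by weight = sorting the tagged list by pvKeyL ----

lemma pv_insertBy_map_fst (x : (Int × List Int) × Nat) :
    ∀ (acc : List ((Int × List Int) × Nat)), (∀ y ∈ acc, y.2 < x.2) →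
      (PySem.List.insertBy (fun a b => decide (pvKeyL a < pvKeyL b)) x acc).map Prod.fst =
        PySem.List.insertBy (fun a b => decide (a.1 < b.1)) x.1 (acc.map Prod.fst) := by
  intro acc
  induction acc with
  | nil => intro _; rfl
  | cons y t ih =>
    intro hlt
    have hy : y.2 < x.2 := hlt y List.mem_cons_self
    have hdec : (decide (pvKeyL x < pvKeyL y)) = (decide (x.1.1 < y.1.1)) := by
      apply decide_eq_decide.2
      rw [pvKeyL, pvKeyL, Prod.Lex.toLex_lt_toLex]
      constructor
      · rintro (h | ⟨h1, h2⟩)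
        · exact h
        · exfalso; simp at h2; omega
      · exact fun h => Or.inl h
    simp only [PySem.List.insertBy, List.map_cons, hdec]
    split
    · simp
    · simp only [List.map_cons, List.cons.injEq, true_and]
      exact ih (fun z hz => hlt z (List.mem_cons_of_mem y hz))

lemma pv_foldl_insert_tagged :
    ∀ (l : List (Int × List Int)) (k : Nat) (accT : List ((Int × List Int) × Nat)),
      (∀ y ∈ accT, y.2 < k) →
      ((l.zipIdx k).foldl
          (fun acc x => PySem.List.insertBy (fun a b => decide (pvKeyL a < pvKeyL b)) x acc) accT).map Prod.fst =
        l.foldl (fun acc x => PySem.List.insertBy (fun a b => decide (a.1 < b.1)) x acc) (accT.map Prod.fst) := by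
  intro l
  induction l with
  | nil => intro k accT _; simp
  | cons x t ih =>
    intro k accT hacc
    rw [List.zipIdx_cons]
    simp only [List.foldl_cons]
    have hmap := pv_insertBy_map_fst (x, k) accT (by intro y hy; exact hacc y hy)
    rw [← hmap]
    apply ih (k + 1)
    intro y hy
    rcases (PySem.List.mem_insertBy _ _ _ _).1 hy with rfl | hy
    · simp
    · exact Nat.lt_succ_of_lt (hacc y hy)

lemma pv_sorted_stable (pairs : List (Int × List Int)) :
    PySem.List.sorted pairs (fun p => p.1) =
      (PySem.List.sorted pairs.zipIdx pvKeyL).map Prod.fst := by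
  rw [PySem.List.sorted_eq_foldl_insertBy pairs (fun p => p.1),
      PySem.List.sorted_eq_foldl_insertBy pairs.zipIdx pvKeyL]
  rw [pv_foldl_insert_tagged pairs 0 [] (by simp)]
  rfl

-- sorting pairs by weight = full bubble of the pairs
lemma pv_sorted_eq_bubble (pairs : List (Int × List Int)) :
    PySem.List.sorted pairs (fun p => p.1) = pvOuter Prod.fst pairs.length pairs := by
  have hlen : pairs.zipIdx.length = pairs.length := by simp
  have htag := pv_zipIdx_tags pairs 0
  have hsorted : PySem.List.sorted pairs.zipIdx pvKeyL
      = pvOuter pvWT pairs.zipIdx.length pairs.zipIdx := by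
    apply PySem.List.sorted_eq_of_perm_of_pairwise_lt
    · exact pvOuter_perm pvWT _ _
    · exact pvOuter_tagged_pairwise_lt pairs.zipIdx htag
  rw [pv_sorted_stable, hsorted, hlen]
  have : pvWT = fun a => Prod.fst (Prod.fst a) := rfl
  rw [this, map_pvOuter Prod.fst Prod.fst pairs.length pairs.zipIdx, List.zipIdx_map_fst 0 pairs]

-- ---- normalising A's window-building loop ----

lemma pyRange60_nil {a b : Int} (h : ¬ a < b) : PySem.List.pyRange a b 60 = [] := by
  rw [PySem.List.pyRange_of_pos a b (by norm_num)]
  simp [if_neg h]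

lemma pyRange60_cons {a b : Int} (h : a < b) :
    PySem.List.pyRange a b 60 = a :: PySem.List.pyRange (a + 60) b 60 := by
  rw [PySem.List.pyRange_of_pos a b (by norm_num), PySem.List.pyRange_of_pos (a + 60) b (by norm_num)]
  by_cases h2 : a + 60 < b
  · rw [if_pos h, if_pos h2]
    have hN : ((b - a + 60 - 1) / 60).toNat = ((b - (a + 60) + 60 - 1) / 60).toNat + 1 := by
      omega
    rw [hN, List.range_succ_eq_map]
    simp only [List.map_cons, List.map_map]
    refine congrArg₂ _ (by push_cast; ring) (List.map_congr_left ?_)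
    intro k _
    simp only [Function.comp]
    push_cast
    ring
  · rw [if_pos h, if_neg h2]
    have hN : ((b - a + 60 - 1) / 60).toNat = 1 := by omega
    rw [hN]
    simp

def pvStarts : List Int := PySem.List.pyRange 0 19441 60

lemma pv_build_eq (activity lux : List Int) :
    ∀ idx : Int,
      pvA_build activity lux idx =
        ((PySem.List.pyRange idx 19441 60).map (fun s => PySem.List.slice lux (some s) (some (s + 720))),
         (PySem.List.pyRange idx 19441 60).map (fun s => PySem.List.slice activity (some s) (some (s + 720))),
         (PySem.List.pyRange idx 19441 60).map (fun s => [s, s + 720])) := by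
  intro idx
  induction idx using pvA_build.induct activity lux with
  | case1 index h ih =>
    rw [pvA_build, if_pos h, pyRange60_cons (a := index) (b := 19441) (by omega), ih]
    simp
  | case2 index h =>
    rw [pvA_build, if_neg h, pyRange60_nil (by omega)]
    simp

-- ---- B's prefix counts ----

lemma pvB_prefix_state (f : Int → Bool) :
    ∀ (l : List Int) (acc : List Int) (s : Int),
      l.foldl (fun (st : List Int × Int) v =>
          let s' := if f v then st.2 + 1 else st.2
          (st.1 ++ [s'], s')) (acc, s) =
        (acc ++ (List.range l.length).map (fun k => s + ((l.take (k + 1)).countP f : Int)),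
         s + (l.countP f : Int)) := by
  intro l
  induction l with
  | nil => intro acc s; simp
  | cons v t ih =>
    intro acc s
    simp only [List.foldl_cons]
    rw [ih]
    have hs' : (if f v then s + 1 else s) = s + (if f v then (1 : Int) else 0) := by
      split <;> simp
    refine Prod.ext ?_ ?_
    · simp only [hs', List.length_cons, List.range_succ_eq_map, List.map_cons, List.map_map,
        List.append_assoc, List.singleton_append]
      have h0 : s + (((v :: t).take (0 + 1)).countP f : Int) = s + (if f v then (1 : Int) else 0) := by
        by_cases hfv : f v <;> simp [hfv]
      rw [← h0]
      refine congrArg _ (congrArg _ (List.map_congr_left ?_))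
      intro k _
      simp only [Function.comp, List.take_succ_cons, List.countP_cons]
      by_cases hfv : f v <;> push_cast [hfv] <;> simp [List.take_zero] <;> omega
    · simp only [hs', List.countP_cons]
      by_cases hfv : f v <;> push_cast [hfv] <;> simp <;> omega

lemma pvB_prefix_getD (f : Int → Bool) (l : List Int) (k : Nat) (hk : k ≤ l.length) :
    (pvB_prefix l f).getD k 0 = (((l.take k).countP f : Nat) : Int) := by
  rw [pvB_prefix, pvB_prefix_state f l [0] 0]
  have : ([0] : List Int) ++ (List.range l.length).map (fun k => 0 + ((l.take (k + 1)).countP f : Int))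
      = (List.range (l.length + 1)).map (fun k => (((l.take k).countP f : Nat) : Int)) := by
    rw [List.range_succ_eq_map]
    simp [List.map_map, Function.comp]
  rw [this, PySem.List.getD_map_range _ _ _ _ (by omega)]

-- per-window count from the prefix-count list = direct count over the slice
lemma pv_window_count (l : List Int) (f : Int → Bool) (s : Int) (h0 : 0 ≤ s)
    (h1 : s + 720 ≤ 20160) :
    PySem.List.pyGetD (pvB_prefix (PySem.List.slice l none (some 20160)) f)
        (min (s + 720) (((PySem.List.slice l none (some 20160)).length : Nat) : Int)) 0 -
      PySem.List.pyGetD (pvB_prefix (PySem.List.slice l none (some 20160)) f)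
        (min s (((PySem.List.slice l none (some 20160)).length : Nat) : Int)) 0 =
      (((PySem.List.slice l (some s) (some (s + 720))).countP f : Nat) : Int) := by
  rw [PySem.List.slice_to l (by norm_num : (0:Int) ≤ 20160)]
  set act := l.take (20160 : Int).toNat with hact
  have hsn : s = ((s.toNat : Nat) : Int) := by omega
  set sn := s.toNat with hsnn
  have hen : s + 720 = (((sn + 720 : Nat) : Nat) : Int) := by omega
  have hmin1 : min (s + 720) ((act.length : Nat) : Int) = ((min (sn + 720) act.length : Nat) : Int) := by
    rw [hen]; push_cast; omega
  have hmin2 : min s ((act.length : Nat) : Int) = ((min sn act.length : Nat) : Int) := by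
    rw [hsn]; push_cast; omega
  rw [hmin1, hmin2, PySem.List.pyGetD_natCast, PySem.List.pyGetD_natCast]
  rw [pvB_prefix_getD f act _ (by omega), pvB_prefix_getD f act _ (by omega)]
  have htake : ∀ (m : Nat), act.take (min m act.length) = act.take m := by
    intro m
    rcases le_total m act.length with h | h
    · rw [min_eq_left h]
    · rw [min_eq_right h, List.take_length, List.take_of_length_le h]
  rw [htake, htake]
  -- replace takes of act by takes of l
  have hact1 : act.take (sn + 720) = l.take (sn + 720) := by
    rw [hact, List.take_take]
    have : min (sn + 720) (20160 : Int).toNat = sn + 720 := by omega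
    rw [this]
  have hact2 : act.take sn = l.take sn := by
    rw [hact, List.take_take]
    have : min sn (20160 : Int).toNat = sn := by omega
    rw [this]
  rw [hact1, hact2]
  have hslice : PySem.List.slice l (some s) (some (s + 720)) = (l.drop sn).take 720 := by
    rw [hsn]
    have hcast : ((sn : Int) + 720) = (((sn + 720 : Nat) : Nat) : Int) := by push_cast; ring
    rw [hcast, PySem.List.slice_natCast]
    congr 1
    omega
  rw [hslice]
  have hsplit : l.take (sn + 720) = l.take sn ++ (l.drop sn).take 720 := List.take_add
  rw [hsplit, List.countP_append]
  push_cast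
  ring

-- ---- A's counters are countP ----

lemma pvA_countBelow_eq (arr : List Int) :
    pvA_countBelow arr 20 = ((arr.countP (fun x => decide (x ≤ 20)) : Nat) : Int) := by
  rw [pvA_countBelow, PySem.List.foldl_ite_add_one (fun num => num ≤ (20 : Int)) arr 0]
  simp

lemma pvA_countZeros_eq (arr : List Int) :
    pvA_countZeros arr = ((arr.countP (fun x => x == 0) : Nat) : Int) := by
  rw [pvA_countZeros, PySem.List.foldl_beq_add_one arr 0 0]
  simp [List.count_eq_countP]

-- ---- assembling both programs around the common pair list ----

def pvWgt (activity lux : List Int) (s : Int) : Int :=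
  pvA_countBelow (PySem.List.slice activity (some s) (some (s + 720))) 20 * 1 +
    1 * pvA_countZeros (PySem.List.slice lux (some s) (some (s + 720)))

def pvPairs (activity lux : List Int) : List (Int × List Int) :=
  pvStarts.map (fun s => (pvWgt activity lux s, [s, s + 720]))

lemma pvStarts_def : pvStarts = PySem.List.pyRange 0 19441 60 := rfl

lemma pv_map_getD_range {α β : Type} (l : List α) (d : α) (g : α → β) :
    (List.range l.length).map (fun k => g (l.getD k d)) = l.map g := by
  apply List.ext_getElem (by simp)
  intro i h1 h2
  simp only [List.getElem_map, List.getElem_range]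
  rw [List.getD_eq_getElem _ _ (by simpa using h2)]

lemma pvA_sort_lists_eq (activity lux : List Int) :
    pvA_sort_lists
        (pvStarts.map (fun s => PySem.List.slice lux (some s) (some (s + 720))))
        (pvStarts.map (fun s => PySem.List.slice activity (some s) (some (s + 720))))
        (pvStarts.map (fun s => [s, s + 720])) =
      ((pvOuter Prod.fst (pvPairs activity lux).length (pvPairs activity lux)).map Prod.fst,
       (pvOuter Prod.fst (pvPairs activity lux).length (pvPairs activity lux)).map Prod.snd) := by
  have hwgt :
      (PySem.List.pyRange 0 (((pvStarts.map (fun s => PySem.List.slice activity (some s) (some (s + 720)))).length : Nat) : Int) 1).foldl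
        (fun acc i =>
          acc ++ [pvA_countBelow (PySem.List.pyGetD (pvStarts.map (fun s => PySem.List.slice activity (some s) (some (s + 720)))) i []) 20 * 1 +
                  1 * pvA_countZeros (PySem.List.pyGetD (pvStarts.map (fun s => PySem.List.slice lux (some s) (some (s + 720)))) i [])]) [] =
      pvStarts.map (pvWgt activity lux) := by
    rw [PySem.List.foldl_append_singleton_eq_map]
    rw [List.nil_append]
    rw [List.length_map, PySem.List.pyRange_zero_natCast, List.map_map]
    have hcong : ∀ k ∈ List.range pvStarts.length,
        ((fun i => pvA_countBelow (PySem.List.pyGetD (pvStarts.map (fun s => PySem.List.slice activity (some s) (some (s + 720)))) i []) 20 * 1 +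
                  1 * pvA_countZeros (PySem.List.pyGetD (pvStarts.map (fun s => PySem.List.slice lux (some s) (some (s + 720)))) i [])) ∘ (fun k : Nat => (k : Int))) k
          = pvWgt activity lux (pvStarts.getD k 0) := by
      intro k hk
      rw [List.mem_range] at hk
      simp only [Function.comp]
      rw [PySem.List.pyGetD_natCast, PySem.List.pyGetD_natCast]
      rw [List.getD_eq_getElem _ _ (by simpa using hk), List.getD_eq_getElem _ _ (by simpa using hk)]
      simp only [List.getElem_map]
      rw [List.getD_eq_getElem _ _ hk]
      rfl
    rw [List.map_congr_left hcong, pv_map_getD_range pvStarts 0 (pvWgt activity lux)]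
  simp only [pvA_sort_lists]
  rw [hwgt]
  have hfst : pvStarts.map (pvWgt activity lux) = (pvPairs activity lux).map Prod.fst := by
    rw [pvPairs, List.map_map]
    rfl
  have hsnd : pvStarts.map (fun s => [s, s + 720]) = (pvPairs activity lux).map Prod.snd := by
    rw [pvPairs, List.map_map]
    rfl
  rw [hfst, hsnd, pvA_bubbleSort]
  have hlen : ((pvPairs activity lux).map Prod.fst).length = (pvPairs activity lux).length := by simp
  rw [hlen]
  exact pvOuter_eq (pvPairs activity lux).length (pvPairs activity lux) 0 _ (by omega) rfl

lemma pvB_eq (date time activity lux : List Int) :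
    find_sleep_windows_alt date time activity lux =
      ((PySem.List.sorted (pvPairs activity lux) (fun p => p.1)).map (fun p => p.1),
       (PySem.List.sorted (pvPairs activity lux) (fun p => p.1)).map (fun p => p.2)) := by
  simp only [find_sleep_windows_alt]
  rw [PySem.List.foldl_append_singleton_eq_map
      (f := fun start =>
        ((PySem.List.pyGetD (pvB_prefix (PySem.List.slice activity none (some 20160)) (fun v => decide (v ≤ 20)))
            (min (start + 720) (((PySem.List.slice activity none (some 20160)).length : Nat) : Int)) 0 -
          PySem.List.pyGetD (pvB_prefix (PySem.List.slice activity none (some 20160)) (fun v => decide (v ≤ 20)))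
            (min start (((PySem.List.slice activity none (some 20160)).length : Nat) : Int)) 0) +
         (PySem.List.pyGetD (pvB_prefix (PySem.List.slice lux none (some 20160)) (fun v => v == 0))
            (min (start + 720) (((PySem.List.slice lux none (some 20160)).length : Nat) : Int)) 0 -
          PySem.List.pyGetD (pvB_prefix (PySem.List.slice lux none (some 20160)) (fun v => v == 0))
            (min start (((PySem.List.slice lux none (some 20160)).length : Nat) : Int)) 0),
         [start, start + 720]))]
  rw [List.nil_append]
  have h19 : (19440 + 1 : Int) = 19441 := by norm_num
  rw [h19, ← pvStarts_def]
  have hpairs :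
      pvStarts.map (fun start =>
        ((PySem.List.pyGetD (pvB_prefix (PySem.List.slice activity none (some 20160)) (fun v => decide (v ≤ 20)))
            (min (start + 720) (((PySem.List.slice activity none (some 20160)).length : Nat) : Int)) 0 -
          PySem.List.pyGetD (pvB_prefix (PySem.List.slice activity none (some 20160)) (fun v => decide (v ≤ 20)))
            (min start (((PySem.List.slice activity none (some 20160)).length : Nat) : Int)) 0) +
         (PySem.List.pyGetD (pvB_prefix (PySem.List.slice lux none (some 20160)) (fun v => v == 0))
            (min (start + 720) (((PySem.List.slice lux none (some 20160)).length : Nat) : Int)) 0 -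
          PySem.List.pyGetD (pvB_prefix (PySem.List.slice lux none (some 20160)) (fun v => v == 0))
            (min start (((PySem.List.slice lux none (some 20160)).length : Nat) : Int)) 0),
         [start, start + 720])) = pvPairs activity lux := by
    rw [pvPairs]
    apply List.map_congr_left
    intro s hs
    rw [pvStarts_def] at hs
    have hb := (PySem.List.mem_pyRange_iff_of_pos (by norm_num : (0:Int) < 60) s).1 hs
    have h0 : 0 ≤ s := by omega
    have h1 : s + 720 ≤ 20160 := by omega
    rw [pv_window_count activity (fun v => decide (v ≤ 20)) s h0 h1,
        pv_window_count lux (fun v => v == 0) s h0 h1]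
    rw [pvWgt, pvA_countBelow_eq, pvA_countZeros_eq]
    ring_nf
  rw [hpairs]

-- ===== VERDICT (by name: the statement is the Claim_ definition above) =====
theorem find_sleep_windows_spec : Claim_equal_find_sleep_windows := by
  intro date time activity lux _
  unfold Spec_find_sleep_windows
  rw [pvB_eq]
  simp only [find_sleep_windows]
  rw [pv_build_eq activity lux 0]
  rw [← pvStarts_def]
  rw [pvA_sort_lists_eq activity lux]
  rw [pv_sorted_eq_bubble (pvPairs activity lux)]
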